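-- pv_equiv track=rewrite | github.com/sshh12/SchoolCode | Algorithms/Misc/ManacherPalindrome.py | _run_manacher
-- ===== SOURCE A (Python) =====
-- def _run_manacher(alt_chars):
--
--     palin_table = [0] * len(alt_chars)
--
--     center, right = 0, 0
--
--     for i in range(len(alt_chars) - 1):
--
--         opposite = center * 2 - i
--
--         if right > i:
--             palin_table[i] = min(right - i, palin_table[opposite])
--
--         while alt_chars[i + (1 + palin_table[i])] == alt_chars[i - (1 + palin_table[i])]:
--             palin_table[i] += 1
--
--         if i + palin_table[i] > right:
--             center, right = i, i + palin_table[i]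
--
--     return palin_table
-- ===== SOURCE B (Python) =====
-- def _run_manacher(alt_chars):
--
--     palin_table = [0] * len(alt_chars)
--
--     for i in range(len(alt_chars) - 1):
--
--         while alt_chars[i + (1 + palin_table[i])] == alt_chars[i - (1 + palin_table[i])]:
--             palin_table[i] += 1
--
--     return palin_table
-- ===== Notes on version B (the rewrite author's own statement) =====
-- stated objective: simpler
-- what changed: Replaces Manacher's amortized center/right mirror bookkeeping with plain expand-around-center: every position expands from radius 0, dropping center/right/opposite and the table lookup entirely, with identical index expressions so wraparound and IndexError behaviour coincide.
import Mathlib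
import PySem

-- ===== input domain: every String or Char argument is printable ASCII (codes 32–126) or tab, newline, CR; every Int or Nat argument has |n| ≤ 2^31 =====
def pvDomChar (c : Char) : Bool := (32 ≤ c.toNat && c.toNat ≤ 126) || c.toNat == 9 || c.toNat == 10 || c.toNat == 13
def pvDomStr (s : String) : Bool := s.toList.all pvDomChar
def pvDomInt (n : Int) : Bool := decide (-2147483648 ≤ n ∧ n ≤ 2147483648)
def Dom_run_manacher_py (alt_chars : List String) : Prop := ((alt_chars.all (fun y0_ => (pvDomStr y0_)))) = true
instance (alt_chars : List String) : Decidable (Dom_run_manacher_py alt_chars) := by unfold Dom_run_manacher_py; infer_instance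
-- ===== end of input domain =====

-- B replaces Manacher's center/right mirror bookkeeping with plain expand-around-center
-- (identical index expressions, so indexing behaviour coincides); objective: simpler.

-- ===== PORT A =====
-- the while-condition `alt_chars[i + (1 + p)] == alt_chars[i - (1 + p)]` (false also covers the IndexError path, excluded by Pre_)
def pvChk (a : List String) (i p : Int) : Bool :=
  match PySem.List.pyGet? a (i + (1 + p)), PySem.List.pyGet? a (i - (1 + p)) with
  | some x, some y => x == y
  | _, _ => false

-- the `while … : palin_table[i] += 1` loop, starting from p; the fuel only makes it total
def pvExpand (a : List String) (i : Int) : Int → Nat → Int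
  | p, 0 => p
  | p, f + 1 => if pvChk a i p then pvExpand a i (p + 1) f else p

-- one iteration of A's for-loop, state = (palin_table, center, right)
def pvStepA (a : List String) (st : List Int × Int × Int) (i : Int) : List Int × Int × Int :=
  let t := st.1
  let center := st.2.1
  let right := st.2.2
  let opposite := center * 2 - i
  let t1 := if right > i then t.set i.toNat (min (right - i) (PySem.List.pyGetD t opposite 0)) else t
  let p := pvExpand a i (PySem.List.pyGetD t1 i 0) (a.length + 1)
  let t2 := t1.set i.toNat p
  if i + p > right then (t2, i, i + p) else (t2, center, right)

def run_manacher_py (alt_chars : List String) : List Int :=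
  ((PySem.List.pyRange 0 ((alt_chars.length : Int) - 1)).foldl (pvStepA alt_chars)
    (List.replicate alt_chars.length 0, 0, 0)).1

-- ===== PORT B =====
-- one iteration of B's for-loop: expand around i starting from palin_table[i] (= 0)
def pvStepB (a : List String) (t : List Int) (i : Int) : List Int :=
  t.set i.toNat (pvExpand a i (PySem.List.pyGetD t i 0) (a.length + 1))

def run_manacher_py_alt (alt_chars : List String) : List Int :=
  (PySem.List.pyRange 0 ((alt_chars.length : Int) - 1)).foldl (pvStepB alt_chars)
    (List.replicate alt_chars.length 0)

-- ===== PRECONDITION & SPEC =====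
-- Pre_ excludes exactly the inputs on which the Python A raises IndexError (some position's
-- expansion walks off the right end before a mismatch); A returns no value there, and B raises identically.
def Pre_run_manacher_py (alt_chars : List String) : Prop :=
  ∀ i < alt_chars.length, i + 1 < alt_chars.length →
    ∃ j < alt_chars.length, i + 1 + j < alt_chars.length ∧
      PySem.List.pyGet? alt_chars ((i : Int) + (1 + (j : Int))) ≠
      PySem.List.pyGet? alt_chars ((i : Int) - (1 + (j : Int)))
instance (alt_chars : List String) : Decidable (Pre_run_manacher_py alt_chars) := by
  unfold Pre_run_manacher_py; infer_instance

def pvWitness_run_manacher_py : List String := ["^", "#", "a", "#", "$"]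

def Spec_run_manacher_py (alt_chars : List String) (out : List Int) : Prop := out = run_manacher_py_alt alt_chars
instance (alt_chars : List String) (out : List Int) : Decidable (Spec_run_manacher_py alt_chars out) := by unfold Spec_run_manacher_py; infer_instance

-- ===== CLAIM (what is proved, stated in full; the proofs are below) =====
def Claim_equal_run_manacher_py : Prop := ∀ (alt_chars : List String), Dom_run_manacher_py alt_chars → Pre_run_manacher_py alt_chars → Spec_run_manacher_py alt_chars (run_manacher_py alt_chars)

-- ===== LEMMAS AND PROOFS =====

-- element of a at index x, read modulo the length (Python indexing normalised)
def pvG (a : List String) (x : Int) : Option String :=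
  PySem.List.pyGet? a (x % (a.length : Int))

theorem pvG_eq_some (a : List String) (x : Int) (hn : 0 < a.length) :
    ∃ s, pvG a x = some s := by
  have h0 : 0 ≤ x % (a.length : Int) := Int.emod_nonneg x (by exact_mod_cast hn.ne')
  have h1 : x % (a.length : Int) < (a.length : Int) := Int.emod_lt_of_pos x (by exact_mod_cast hn)
  simp only [pvG, PySem.List.pyGet?, PySem.List.pyIdx?, if_pos h0, if_pos h1, Option.bind]
  exact ⟨_, List.getElem?_eq_getElem (by omega)⟩

theorem pvG_shift (a : List String) (x : Int) :
    pvG a (x + (a.length : Int)) = pvG a x := by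
  unfold pvG
  rw [← Int.emod_eq_add_self_emod]

theorem pyGet?_eq_pvG (a : List String) (x : Int)
    (h1 : -(a.length : Int) ≤ x) (h2 : x < (a.length : Int)) :
    PySem.List.pyGet? a x = pvG a x := by
  by_cases h0 : 0 ≤ x
  · have : x % (a.length : Int) = x := Int.emod_eq_of_lt h0 h2
    simp [pvG, this]
  · push Not at h0
    have hn : 0 < a.length := by omega
    have hmod : x % (a.length : Int) = x + a.length := by
      have h := Int.emod_eq_of_lt (a := x + a.length) (b := (a.length : Int)) (by omega) (by omega)
      calc x % (a.length:Int) = (x + a.length) % a.length := Int.emod_eq_add_self_emod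
        _ = x + a.length := h
    simp only [pvG, hmod, PySem.List.pyGet?, PySem.List.pyIdx?]
    rw [if_neg (by omega), if_pos h1, if_pos (by omega : (0:Int) ≤ x + a.length), if_pos (by omega)]
    congr 2
    omega

theorem pvChk_iff (a : List String) (i p : Int) (hn : 0 < a.length)
    (h1 : -(a.length : Int) ≤ i + (1 + p)) (h2 : i + (1 + p) < (a.length : Int))
    (h3 : -(a.length : Int) ≤ i - (1 + p)) (h4 : i - (1 + p) < (a.length : Int)) :
    (pvChk a i p = true ↔ pvG a (i + (1 + p)) = pvG a (i - (1 + p))) := by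
  obtain ⟨x, hx⟩ := pvG_eq_some a (i + (1 + p)) hn
  obtain ⟨y, hy⟩ := pvG_eq_some a (i - (1 + p)) hn
  unfold pvChk
  rw [pyGet?_eq_pvG a _ h1 h2, pyGet?_eq_pvG a _ h3 h4, hx, hy]
  simp

theorem pvChk_false_of_ne (a : List String) (i p : Int)
    (h : PySem.List.pyGet? a (i + (1 + p)) ≠ PySem.List.pyGet? a (i - (1 + p))) :
    pvChk a i p = false := by
  unfold pvChk
  rcases hx : PySem.List.pyGet? a (i + (1 + p)) with _ | x <;>
    rcases hy : PySem.List.pyGet? a (i - (1 + p)) with _ | y <;>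
      simp_all

theorem pvChk_exists_false (a : List String) (i : Int) :
    ∃ j : Nat, pvChk a i (j : Int) = false := by
  refine ⟨a.length + i.natAbs, ?_⟩
  have hnone : PySem.List.pyGet? a (i + (1 + ((a.length + i.natAbs : Nat) : Int))) = none := by
    simp only [PySem.List.pyGet?, PySem.List.pyIdx?]
    rw [if_pos (by omega), if_neg (by omega)]
    rfl
  unfold pvChk
  rw [hnone]

-- first radius at which the while-condition fails (mismatch, or index out of range)
def pvQ (a : List String) (i : Int) : Nat := Nat.find (pvChk_exists_false a i)

theorem pvQ_spec (a : List String) (i : Int) : pvChk a i (pvQ a i : Int) = false :=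
  Nat.find_spec (pvChk_exists_false a i)

theorem pvQ_min (a : List String) (i : Int) (j : Int) (h0 : 0 ≤ j) (hj : j < (pvQ a i : Int)) :
    pvChk a i j = true := by
  have hq : pvQ a i = Nat.find (pvChk_exists_false a i) := rfl
  have h := Nat.find_min (pvChk_exists_false a i) (m := j.toNat) (by omega)
  simp only [Bool.not_eq_false] at h
  rwa [Int.toNat_of_nonneg h0] at h

theorem pvQ_le (a : List String) (i : Int) (h0 : 0 ≤ i) (hi : i < (a.length : Int)) :
    (pvQ a i : Int) ≤ (a.length : Int) - 1 - i := by
  have hw : pvChk a i ((((a.length : Int) - 1 - i).toNat : Nat) : Int) = false := by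
    have hnone : PySem.List.pyGet? a (i + (1 + ((((a.length : Int) - 1 - i).toNat : Nat) : Int))) = none := by
      simp only [PySem.List.pyGet?, PySem.List.pyIdx?]
      rw [if_pos (by omega), if_neg (by omega)]
      rfl
    unfold pvChk
    rw [hnone]
  have h2 : pvQ a i ≤ ((a.length : Int) - 1 - i).toNat :=
    Nat.find_min' (pvChk_exists_false a i) hw
  omega

theorem pvQ_le_pre (a : List String) (hpre : Pre_run_manacher_py a) (i : Int)
    (h0 : 0 ≤ i) (hi : i < (a.length : Int) - 1) :
    (pvQ a i : Int) ≤ (a.length : Int) - 2 - i := by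
  obtain ⟨j, hj1, hj2, hne⟩ := hpre i.toNat (by omega) (by omega)
  have hfalse : pvChk a i (j : Int) = false := by
    have := pvChk_false_of_ne a ((i.toNat : Nat) : Int) (j : Int) (by exact_mod_cast hne)
    rwa [Int.toNat_of_nonneg h0] at this
  have h2 : pvQ a i ≤ j := Nat.find_min' (pvChk_exists_false a i) hfalse
  omega

theorem pvExpand_eq (a : List String) (i : Int) (f : Nat) (p : Int)
    (hp0 : 0 ≤ p) (hpq : p ≤ (pvQ a i : Int)) (hf : (pvQ a i : Int) - p < (f : Int)) :
    pvExpand a i p f = (pvQ a i : Int) := by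
  induction f generalizing p with
  | zero => omega
  | succ f ih =>
    by_cases hc : pvChk a i p = true
    · have hne : p ≠ (pvQ a i : Int) := by
        intro h; rw [h, pvQ_spec] at hc; exact Bool.false_ne_true hc
      rw [pvExpand, if_pos hc]
      exact ih (p + 1) (by omega) (by omega) (by omega)
    · have : p = (pvQ a i : Int) := by
        by_contra h
        exact hc (pvQ_min a i p hp0 (by omega))
      rw [pvExpand, if_neg hc, this]

-- mirror property around a processed center
theorem pvMirror (a : List String) (c : Int) (hc : 0 ≤ c)
    (hr : c + (pvQ a c : Int) ≤ (a.length : Int) - 2) (m : Int)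
    (hm1 : 1 ≤ m) (hm2 : m ≤ (pvQ a c : Int)) :
    pvG a (c + m) = pvG a (c - m) := by
  have hn : 0 < a.length := by omega
  have hchk := pvQ_min a c (m - 1) (by omega) (by omega)
  have := (pvChk_iff a c (m - 1) hn (by omega) (by omega) (by omega) (by omega)).mp hchk
  have e1 : c + (1 + (m - 1)) = c + m := by ring
  have e2 : c - (1 + (m - 1)) = c - m := by ring
  rwa [e1, e2] at this

-- Manacher's skip is sound: the first p0 comparisons at i succeed
theorem pvSkip (a : List String) (c i p0 : Int)
    (hc : 0 ≤ c) (hci : c < i) (hi : i < (a.length : Int) - 1)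
    (hr : c + (pvQ a c : Int) ≤ (a.length : Int) - 2)
    (hp0 : p0 ≤ c + (pvQ a c : Int) - i)
    (hopp : ∀ j : Int, 0 ≤ j → j < p0 →
      pvG a ((c * 2 - i) + (1 + j)) = pvG a ((c * 2 - i) - (1 + j)))
    (j : Int) (hj0 : 0 ≤ j) (hj : j < p0) :
    pvChk a i j = true := by
  have hn : 0 < a.length := by omega
  have hR0 : 0 ≤ (pvQ a c : Int) := by positivity
  have mir : ∀ m : Int, 1 ≤ m → m ≤ (pvQ a c : Int) → pvG a (c + m) = pvG a (c - m) :=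
    fun m h1 h2 => pvMirror a c hc hr m h1 h2
  rw [pvChk_iff a i j hn (by omega) (by omega) (by omega) (by omega)]
  have step1 : pvG a (i + (1 + j)) = pvG a (c - (i - c + 1 + j)) := by
    rw [show i + (1 + j) = c + (i - c + 1 + j) by ring]
    exact mir (i - c + 1 + j) (by omega) (by omega)
  have step2 : pvG a (c - (i - c + 1 + j)) = pvG a (c - (i - c - 1 - j)) := by
    rw [show c - (i - c + 1 + j) = (c * 2 - i) - (1 + j) by ring,
        show c - (i - c - 1 - j) = (c * 2 - i) + (1 + j) by ring]
    exact (hopp j hj0 hj).symm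
  have key : pvG a (c - (i - c - 1 - j)) = pvG a (c + (i - c - 1 - j)) := by
    rcases lt_trichotomy (i - c - 1 - j) 0 with hm | hm | hm
    · rw [show c - (i - c - 1 - j) = c + (-(i - c - 1 - j)) by ring,
          show c + (i - c - 1 - j) = c - (-(i - c - 1 - j)) by ring]
      exact mir (-(i - c - 1 - j)) (by omega) (by omega)
    · rw [hm]; norm_num
    · exact (mir (i - c - 1 - j) (by omega) (by omega)).symm
  rw [step1, step2, key, show c + (i - c - 1 - j) = i - (1 + j) by ring]

-- B's partial table after k iterations
def pvTab (a : List String) (k : Nat) : List Int :=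
  (List.range k).foldl (fun (t : List Int) (j : Nat) => pvStepB a t (j : Int))
    (List.replicate a.length 0)

theorem pvTab_succ (a : List String) (k : Nat) :
    pvTab a (k + 1) = pvStepB a (pvTab a k) (k : Int) := by
  unfold pvTab
  rw [List.range_succ, List.foldl_append]
  rfl

theorem pvTab_length (a : List String) (k : Nat) : (pvTab a k).length = a.length := by
  induction k with
  | zero => simp [pvTab]
  | succ k ih => rw [pvTab_succ]; simp [pvStepB, ih]

theorem pvTab_get (a : List String) (k : Nat) (j : Nat) (hj : j < a.length) :
    (pvTab a k)[j]? = some (if j < k then (pvQ a (j : Int) : Int) else 0) := by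
  induction k with
  | zero =>
    simp only [pvTab, List.range_zero]
    simp [hj]
  | succ k ih =>
    rw [pvTab_succ]
    unfold pvStepB
    rw [Int.toNat_natCast, List.getElem?_set]
    by_cases hjk : k = j
    · subst hjk
      have hk : k < a.length := hj
      rw [if_pos rfl, if_pos (by rw [pvTab_length]; exact hk)]
      have hstart : PySem.List.pyGetD (pvTab a k) (k : Int) 0 = 0 := by
        rw [PySem.List.pyGetD_natCast, List.getD_eq_getElem?_getD, ih, if_neg (by omega)]
        rfl
      rw [hstart, pvExpand_eq a k (a.length + 1) 0 le_rfl (by positivity)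
        (by have := pvQ_le a k (by positivity) (by exact_mod_cast hk); push_cast; omega)]
      rw [if_pos (by omega)]
    · rw [if_neg hjk, ih]
      congr 1
      by_cases h2 : j < k
      · rw [if_pos h2, if_pos (by omega)]
      · rw [if_neg h2, if_neg (by omega)]

theorem pvTab_lookup (a : List String) (k : Nat) (x : Int) (hn : 0 < a.length)
    (hx1 : -(a.length : Int) ≤ x) (hx2 : x < (a.length : Int)) :
    PySem.List.pyGetD (pvTab a k) x 0 =
      if (x % (a.length : Int)).toNat < k then (pvQ a ((x % (a.length : Int)).toNat : Nat) : Int) else 0 := by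
  have hlen : (pvTab a k).length = a.length := pvTab_length a k
  have hm0 : 0 ≤ x % (a.length : Int) := Int.emod_nonneg x (by omega)
  have hm1 : x % (a.length : Int) < (a.length : Int) := Int.emod_lt_of_pos x (by omega)
  have hw : (x % (a.length : Int)).toNat < a.length := by omega
  by_cases h0 : 0 ≤ x
  · have : x % (a.length : Int) = x := Int.emod_eq_of_lt h0 hx2
    rw [PySem.List.pyGetD_of_nonneg _ _ h0, List.getD_eq_getElem?_getD, this]
    rw [pvTab_get a k x.toNat (by omega)]
    rfl
  · have hmod : x % (a.length : Int) = x + a.length := by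
      have h := Int.emod_eq_of_lt (a := x + a.length) (b := (a.length : Int)) (by omega) (by omega)
      calc x % (a.length:Int) = (x + a.length) % a.length := Int.emod_eq_add_self_emod
        _ = x + a.length := h
    simp only [PySem.List.pyGetD, PySem.List.pyGet?, PySem.List.pyIdx?]
    rw [if_neg (by omega), if_pos (by omega), hmod]
    have hidx : (pvTab a k).length - (-x).toNat = (x + (a.length : Int)).toNat := by
      rw [hlen]; omega
    rw [hidx, Option.bind_some, pvTab_get a k _ (by omega)]
    rfl

theorem pvSkipAll (a : List String) (hpre : Pre_run_manacher_py a) (k : Nat) (c : Int)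
    (hc : 0 ≤ c) (hck : c < (k : Int)) (hk : (k : Int) < (a.length : Int) - 1) :
    ∀ j : Int, 0 ≤ j →
      j < min (c + (pvQ a c : Int) - k) (PySem.List.pyGetD (pvTab a k) (c * 2 - (k : Int)) 0) →
      pvChk a (k : Int) j = true := by
  intro j hj0 hj
  have hn : 0 < a.length := by omega
  have hr : c + (pvQ a c : Int) ≤ (a.length : Int) - 2 := by
    have := pvQ_le_pre a hpre c hc (by omega)
    omega
  set opp := c * 2 - (k : Int) with hopp_def
  have ho1 : -(a.length : Int) ≤ opp := by omega
  have ho2 : opp < (a.length : Int) := by omega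
  rw [pvTab_lookup a k opp hn ho1 ho2] at hj
  set w := (opp % (a.length : Int)).toNat with hw_def
  have hm0 : 0 ≤ opp % (a.length : Int) := Int.emod_nonneg opp (by omega)
  have hm1 : opp % (a.length : Int) < (a.length : Int) := Int.emod_lt_of_pos opp (by omega)
  by_cases hwk : w < k
  · rw [if_pos hwk] at hj
    have hqw : (pvQ a (w : Int) : Int) ≤ (a.length : Int) - 2 - w :=
      pvQ_le_pre a hpre (w : Int) (by positivity) (by omega)
    have hopp : ∀ j : Int, 0 ≤ j → j < min (c + (pvQ a c : Int) - k)
        (if w < k then (pvQ a (w : Int) : Int) else 0) →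
        pvG a (opp + (1 + j)) = pvG a (opp - (1 + j)) := by
      intro j hj0 hj
      rw [if_pos hwk] at hj
      have hjq : j < (pvQ a (w : Int) : Int) := by omega
      have hchkw := pvQ_min a (w : Int) j hj0 hjq
      have hgw := (pvChk_iff a (w : Int) j hn (by omega) (by omega) (by omega) (by omega)).mp hchkw
      by_cases hs : 0 ≤ opp
      · have : opp % (a.length : Int) = opp := Int.emod_eq_of_lt hs ho2
        have hwo : (w : Int) = opp := by omega
        rwa [hwo] at hgw
      · have hmod : opp % (a.length : Int) = opp + a.length := by
          have h := Int.emod_eq_of_lt (a := opp + a.length) (b := (a.length : Int)) (by omega) (by omega)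
          calc opp % (a.length:Int) = (opp + a.length) % a.length := Int.emod_eq_add_self_emod
            _ = opp + a.length := h
        have hwo : (w : Int) = opp + a.length := by omega
        rw [hwo] at hgw
        have e1 : (opp + (a.length : Int)) + (1 + j) = (opp + (1 + j)) + (a.length : Int) := by ring
        have e2 : (opp + (a.length : Int)) - (1 + j) = (opp - (1 + j)) + (a.length : Int) := by ring
        rw [e1, e2, pvG_shift, pvG_shift] at hgw
        exact hgw
    exact pvSkip a c (k : Int) _ hc hck hk hr (min_le_left _ _) hopp j hj0 (by
      rw [if_pos hwk]; exact hj)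
  · rw [if_neg hwk] at hj
    omega

-- A's state after k iterations
def pvRunA (a : List String) (k : Nat) : List Int × Int × Int :=
  (List.range k).foldl (fun (st : List Int × Int × Int) (j : Nat) => pvStepA a st (j : Int))
    (List.replicate a.length 0, 0, 0)

theorem pvRunA_succ (a : List String) (k : Nat) :
    pvRunA a (k + 1) = pvStepA a (pvRunA a k) (k : Int) := by
  unfold pvRunA
  rw [List.range_succ, List.foldl_append]
  rfl

-- invariant for (center, right)
def pvCR (a : List String) (k : Nat) (c r : Int) : Prop :=
  (c = 0 ∧ r = 0) ∨ (0 ≤ c ∧ c < (k : Int) ∧ r = c + (pvQ a c : Int))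

theorem pvStepA_char (a : List String) (hpre : Pre_run_manacher_py a) (k : Nat)
    (hk : (k : Int) ≤ (a.length : Int) - 2) (c r : Int) (hcr : pvCR a k c r) :
    pvStepA a (pvTab a k, c, r) (k : Int) =
      (pvTab a (k + 1),
        if (k : Int) + (pvQ a (k : Int) : Int) > r
        then ((k : Int), (k : Int) + (pvQ a (k : Int) : Int)) else (c, r)) := by
  have hn : 0 < a.length := by omega
  have hkn : k < a.length := by omega
  have hlen : (pvTab a k).length = a.length := pvTab_length a k
  have hQk : (pvQ a (k : Int) : Int) ≤ (a.length : Int) - 1 - k :=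
    pvQ_le a (k : Int) (by positivity) (by omega)
  have htab0 : PySem.List.pyGetD (pvTab a k) (k : Int) 0 = 0 := by
    rw [PySem.List.pyGetD_natCast, List.getD_eq_getElem?_getD, pvTab_get a k k hkn,
      if_neg (by omega)]
    rfl
  have htabB : pvTab a (k + 1) = (pvTab a k).set k (pvQ a (k : Int) : Int) := by
    rw [pvTab_succ]
    unfold pvStepB
    rw [Int.toNat_natCast, htab0,
      pvExpand_eq a (k : Int) (a.length + 1) 0 le_rfl (by positivity) (by push_cast; omega)]
  by_cases hgt : r > (k : Int)
  · rcases hcr with ⟨hc0, hr0⟩ | ⟨hc0, hck, hreq⟩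
    · omega
    simp only [pvStepA, if_pos hgt]
    set p0 := min (r - (k : Int)) (PySem.List.pyGetD (pvTab a k) (c * 2 - (k : Int)) 0) with hp0_def
    have ho1 : -(a.length : Int) ≤ c * 2 - (k : Int) := by omega
    have ho2 : c * 2 - (k : Int) < (a.length : Int) := by omega
    have hlookup := pvTab_lookup a k (c * 2 - (k : Int)) hn ho1 ho2
    have hp0n : 0 ≤ p0 := by
      rw [hp0_def, hlookup]
      by_cases h : ((c * 2 - (k : Int)) % (a.length : Int)).toNat < k
      · rw [if_pos h]; exact le_min (by omega) (by positivity)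
      · rw [if_neg h]; exact le_min (by omega) le_rfl
    have hskip : ∀ j : Int, 0 ≤ j → j < p0 → pvChk a (k : Int) j = true := by
      intro j hj0 hj
      refine pvSkipAll a hpre k c hc0 hck (by omega) j hj0 ?_
      rw [← hreq]
      exact hj
    have hp0le : p0 ≤ (pvQ a (k : Int) : Int) := by
      by_contra h
      have := hskip (pvQ a (k : Int) : Int) (by positivity) (by omega)
      rw [pvQ_spec] at this
      exact Bool.false_ne_true this
    have h_t1get :
        PySem.List.pyGetD ((pvTab a k).set (k : Int).toNat p0) (k : Int) 0 = p0 := by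
      rw [Int.toNat_natCast, PySem.List.pyGetD_natCast, List.getD_eq_getElem?_getD,
        List.getElem?_set_self (by omega)]
      rfl
    rw [h_t1get, pvExpand_eq a (k : Int) (a.length + 1) p0 hp0n hp0le (by push_cast; omega)]
    rw [Int.toNat_natCast, List.set_set, ← htabB]
    split_ifs <;> rfl
  · rcases hcr with ⟨hc0, hr0⟩ | ⟨hc0, hck, hreq⟩ <;>
    · simp only [pvStepA, if_neg hgt]
      rw [htab0, pvExpand_eq a (k : Int) (a.length + 1) 0 le_rfl (by positivity)
        (by push_cast; omega), Int.toNat_natCast, ← htabB]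
      split_ifs <;> rfl

theorem pvInvA (a : List String) (hpre : Pre_run_manacher_py a) (k : Nat)
    (hk : (k : Int) ≤ (a.length : Int) - 1) :
    (pvRunA a k).1 = pvTab a k ∧ pvCR a k (pvRunA a k).2.1 (pvRunA a k).2.2 := by
  induction k with
  | zero => exact ⟨rfl, Or.inl ⟨rfl, rfl⟩⟩
  | succ k ih =>
    obtain ⟨h1, hcr⟩ := ih (by push_cast at hk ⊢; omega)
    have hst : pvRunA a k = (pvTab a k, (pvRunA a k).2.1, (pvRunA a k).2.2) := by
      rw [← h1]
    have := pvStepA_char a hpre k (by push_cast at hk ⊢; omega) _ _ hcr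
    rw [pvRunA_succ, hst, this]
    refine ⟨rfl, ?_⟩
    by_cases hgt : (k : Int) + (pvQ a (k : Int) : Int) > (pvRunA a k).2.2
    · rw [if_pos hgt]
      exact Or.inr ⟨by positivity, by push_cast; omega, rfl⟩
    · rw [if_neg hgt]
      rcases hcr with ⟨hc0, hr0⟩ | ⟨hc0, hck, hreq⟩
      · exact Or.inl ⟨hc0, hr0⟩
      · exact Or.inr ⟨hc0, by push_cast; omega, hreq⟩

-- ===== VERDICT (by name: the statement is the Claim_ definition above) =====
theorem run_manacher_py_spec : Claim_equal_run_manacher_py := by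
  intro a _hdom hpre
  unfold Spec_run_manacher_py
  rcases Nat.eq_zero_or_pos a.length with h0 | h1
  · have ha : a = [] := List.length_eq_zero_iff.mp h0
    subst ha
    rfl
  · have hcast : ((a.length : Int) - 1) = ((a.length - 1 : Nat) : Int) := by omega
    have hA : run_manacher_py a = (pvRunA a (a.length - 1)).1 := by
      unfold run_manacher_py pvRunA
      rw [hcast, PySem.List.pyRange_zero_natCast, List.foldl_map]
    have hB : run_manacher_py_alt a = pvTab a (a.length - 1) := by
      unfold run_manacher_py_alt pvTab
      rw [hcast, PySem.List.pyRange_zero_natCast, List.foldl_map]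
    rw [hA, hB, (pvInvA a hpre (a.length - 1) (by omega)).1]
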